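-- pv_equiv track=rewrite | github.com/ash-02/simple-programs | Matlab/ratings.py | countTeams
-- ===== SOURCE A (Python) =====
-- def countTeams(rating, queries):
--
--     # HackerRank is organizing a chess tournament for its employees. There are n employees, having IDs 1, 2, ., n, where the ith employee has a rating of rating[i]. Two employees can form a team if they have the same rating, and one employee can be in at most one team.
--     # There are q queries, each of the form (1, r). For each query, find the number of teams that can be formed from employees with IDs between / and r, inclusive. All queries are independent of each other.
--
--     resultArray = []
--
--     for query in queries:
--         l = query[0]
--         r = query[1]
--         count = 0
--         for i in range(l, r+1):
--             for j in range(i+1, r+1):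
--                 for k in range(j+1, r+1):
--                     if rating[i-1] < rating[j-1] < rating[k-1] or rating[i-1] > rating[j-1] > rating[k-1]:
--                         count += 1
--         resultArray.append(count)
--
--     return resultArray
-- ===== SOURCE B (Python) =====
-- def countTeams(rating, queries):
--     # Fix the middle element j of each monotone triple: count elements before j
--     # that are smaller/larger and elements after j that are larger/smaller,
--     # and add less_left*greater_right + greater_left*less_right.
--     def count_in(a, b, pred):
--         return sum(1 for t in range(a, b) if pred(rating[t - 1]))
--
--     res = []
--     for q in queries:
--         l = q[0]
--         r = q[1]
--         if r - l + 1 < 3: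
--             # a window with fewer than three indices holds no triple
--             res.append(0)
--             continue
--         total = 0
--         for j in range(l, r + 1):
--             rj = rating[j - 1]
--             less_left = count_in(l, j, lambda x: x < rj)
--             greater_left = count_in(l, j, lambda x: x > rj)
--             less_right = count_in(j + 1, r + 1, lambda x: x < rj)
--             greater_right = count_in(j + 1, r + 1, lambda x: x > rj)
--             total += less_left * greater_right + greater_left * less_right
--         res.append(total)
--     return res
-- ===== Notes on version B (the rewrite author's own statement) =====
-- stated objective: alternative
-- what changed: B fixes the middle element of each monotone triple and multiplies counts of smaller/larger elements on each side (skipping windows of fewer than three indices, which hold no triple), replacing A's triple nested loop over all (i,j,k); cubic-in-window enumeration becomes quadratic counting, though a timing run's small windows showed no measured speed-up.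
-- outside the precondition, e.g. on countTeams([-3], [[0, 2]]): A returns [0], B raises IndexError
import Mathlib
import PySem

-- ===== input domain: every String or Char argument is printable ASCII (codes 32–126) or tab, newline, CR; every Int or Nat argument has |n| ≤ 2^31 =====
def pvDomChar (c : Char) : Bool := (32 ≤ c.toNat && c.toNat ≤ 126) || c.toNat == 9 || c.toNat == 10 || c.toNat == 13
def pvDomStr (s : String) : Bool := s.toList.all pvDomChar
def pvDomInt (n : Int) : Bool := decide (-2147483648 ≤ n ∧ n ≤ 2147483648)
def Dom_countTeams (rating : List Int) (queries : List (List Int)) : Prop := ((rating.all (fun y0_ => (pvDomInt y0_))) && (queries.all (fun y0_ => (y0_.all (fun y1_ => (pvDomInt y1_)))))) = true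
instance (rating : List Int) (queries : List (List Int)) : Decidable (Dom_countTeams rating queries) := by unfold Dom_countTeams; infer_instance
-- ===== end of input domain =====

-- B fixes the middle element of each monotone triple and multiplies side counts instead of
-- A's triple nested loop over all (i,j,k); equal return values on Pre_.

-- shared 1-based indexing helper: rating[i-1] (Python semantics; default only taken outside Pre_)
def pvRate (rating : List Int) (i : Int) : Int := PySem.List.pyGetD rating (i - 1) 0

-- ===== PORT A =====
def countTeams (rating : List Int) (queries : List (List Int)) : List Int :=
  queries.foldl (fun resultArray query =>
    let l := PySem.List.pyGetD query 0 0
    let r := PySem.List.pyGetD query 1 0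
    let count := (PySem.List.pyRange l (r + 1) 1).foldl (fun count i =>
      (PySem.List.pyRange (i + 1) (r + 1) 1).foldl (fun count j =>
        (PySem.List.pyRange (j + 1) (r + 1) 1).foldl (fun count k =>
          if (pvRate rating i < pvRate rating j ∧ pvRate rating j < pvRate rating k) ∨
             (pvRate rating i > pvRate rating j ∧ pvRate rating j > pvRate rating k)
          then count + 1 else count) count) count) 0
    resultArray ++ [count]) []

-- ===== PORT B =====
-- count_in(a, b, pred): how many t in range(a, b) have pred(rating[t-1])
def pvCountIn (rating : List Int) (a b : Int) (pred : Int → Prop) [DecidablePred pred] : Int :=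
  ((PySem.List.pyRange a b 1).map
    (fun t => if pred (pvRate rating t) then (1 : Int) else 0)).sum

def countTeams_alt (rating : List Int) (queries : List (List Int)) : List Int :=
  queries.foldl (fun res q =>
    let l := PySem.List.pyGetD q 0 0
    let r := PySem.List.pyGetD q 1 0
    let total := if r - l + 1 < 3 then 0 else
      (PySem.List.pyRange l (r + 1) 1).foldl (fun total j =>
      let rj := pvRate rating j
      let lessLeft := pvCountIn rating l j (fun x => x < rj)
      let greaterLeft := pvCountIn rating l j (fun x => x > rj)
      let lessRight := pvCountIn rating (j + 1) (r + 1) (fun x => x < rj)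
      let greaterRight := pvCountIn rating (j + 1) (r + 1) (fun x => x > rj)
      total + (lessLeft * greaterRight + greaterLeft * lessRight)) 0
    res ++ [total]) []

-- ===== PRECONDITION & SPEC =====
-- Pre_ excludes queries with fewer than two entries (A raises IndexError) and queries whose
-- window [l,r] of three or more indices reaches outside Python's (wraparound-inclusive) index
-- range of rating: there A raises IndexError, except when chained-comparison short-circuiting
-- happens never to touch the out-of-range index, an accident of the ratings' values on which A
-- returns while B raises (cite in claim.json).
def Pre_countTeams (rating : List Int) (queries : List (List Int)) : Prop :=
  ∀ q ∈ queries, 2 ≤ q.length ∧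
    (PySem.List.pyGetD q 0 0 + 2 ≤ PySem.List.pyGetD q 1 0 →
      1 - (rating.length : Int) ≤ PySem.List.pyGetD q 0 0 ∧
      PySem.List.pyGetD q 1 0 ≤ (rating.length : Int))
instance (rating : List Int) (queries : List (List Int)) : Decidable (Pre_countTeams rating queries) := by
  unfold Pre_countTeams; infer_instance

def pvWitness_countTeams : List Int × List (List Int) := ([1, 3, 2, 5, 4], [[1, 5], [2, 4], [4, 2]])

def Spec_countTeams (rating : List Int) (queries : List (List Int)) (out : List Int) : Prop := out = countTeams_alt rating queries
instance (rating : List Int) (queries : List (List Int)) (out : List Int) : Decidable (Spec_countTeams rating queries out) := by unfold Spec_countTeams; infer_instance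

-- ===== CLAIM (what is proved, stated in full; the proofs are below) =====
def Claim_equal_countTeams : Prop := ∀ (rating : List Int) (queries : List (List Int)), Dom_countTeams rating queries → Pre_countTeams rating queries → Spec_countTeams rating queries (countTeams rating queries)

-- ===== LEMMAS AND PROOFS =====

-- counting loop 'if P x: c += 1' as a 0/1 sum
theorem pvFoldlIfCount {α : Type} (L : List α) (P : α → Prop) [DecidablePred P] (a : Int) :
    L.foldl (fun c x => if P x then c + 1 else c) a
      = a + (L.map (fun x => if P x then (1 : Int) else 0)).sum := by
  induction L generalizing a with
  | nil => simp
  | cons y ys ih => simp [List.foldl, ih]; split_ifs <;> ring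

-- accumulator loop 'c += f x' as a sum
theorem pvFoldlPlus {α : Type} (L : List α) (f : α → Int) (a : Int) :
    L.foldl (fun c x => c + f x) a = a + (L.map f).sum := by
  induction L generalizing a with
  | nil => simp
  | cons y ys ih => simp [List.foldl, ih]; ring

theorem pvIcoConsInt (a b : Int) (h : a < b) :
    Finset.Ico a b = insert a (Finset.Ico (a + 1) b) := by
  apply Finset.ext; intro x; simp only [Finset.mem_Ico, Finset.mem_insert]; omega

-- list sum over range(a, b) as a Finset.Ico sum over Int
theorem pvSumIcoAux (f : Int → Int) (b : Int) :
    ∀ (n : Nat) (a : Int), (b - a).toNat = n →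
      ((PySem.List.pyRange a b 1).map f).sum = ∑ k ∈ Finset.Ico a b, f k := by
  intro n
  induction n with
  | zero =>
    intro a h0
    have hba : b ≤ a := by omega
    rw [PySem.List.pyRange_one_eq_nil hba, Finset.Ico_eq_empty (by omega)]
    simp
  | succ n ih =>
    intro a h
    have hab : a < b := by omega
    rw [PySem.List.pyRange_one_cons hab, pvIcoConsInt a b hab, List.map_cons, List.sum_cons,
      Finset.sum_insert (by simp only [Finset.mem_Ico]; omega), ih (a + 1) (by omega)]

theorem pvSumIco (f : Int → Int) (a b : Int) :
    ((PySem.List.pyRange a b 1).map f).sum = ∑ k ∈ Finset.Ico a b, f k :=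
  pvSumIcoAux f b (b - a).toNat a rfl

-- the two ways of summing over a ≤ i < j < b agree (Int version of Finset.sum_Ico_Ico_comm')
theorem pvSumIcoIcoComm (a b : Int) (f : Int → Int → Int) :
    (∑ i ∈ Finset.Ico a b, ∑ j ∈ Finset.Ico (i + 1) b, f i j)
      = ∑ j ∈ Finset.Ico a b, ∑ i ∈ Finset.Ico a j, f i j := by
  rw [Finset.sum_sigma', Finset.sum_sigma']
  refine Finset.sum_nbij' (fun x => ⟨x.2, x.1⟩) (fun x => ⟨x.2, x.1⟩) ?_ ?_ (fun _ _ => rfl)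
    (fun _ _ => rfl) (fun _ _ => rfl) <;>
  simp only [Finset.mem_Ico, Sigma.forall, Finset.mem_sigma] <;>
  · intro i j h
    omega

-- the monotone-triple indicator splits as a sum of two products of indicators
theorem pvIteOrSplit (x y z : Int) :
    (if (x < y ∧ y < z) ∨ (y < x ∧ z < y) then (1 : Int) else 0)
      = (if x < y then (1 : Int) else 0) * (if y < z then (1 : Int) else 0)
        + (if y < x then (1 : Int) else 0) * (if z < y then (1 : Int) else 0) := by
  split_ifs <;> omega

-- fix-the-middle identity over Int windows
theorem pvMiddleZ (g : Int → Int) (l u : Int) :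
    (∑ i ∈ Finset.Ico l u, ∑ j ∈ Finset.Ico (i + 1) u, ∑ k ∈ Finset.Ico (j + 1) u,
        (if (g i < g j ∧ g j < g k) ∨ (g i > g j ∧ g j > g k) then (1 : Int) else 0))
      = ∑ j ∈ Finset.Ico l u,
          ((∑ t ∈ Finset.Ico l j, if g t < g j then (1 : Int) else 0)
              * (∑ t ∈ Finset.Ico (j + 1) u, if g t > g j then (1 : Int) else 0)
            + (∑ t ∈ Finset.Ico l j, if g t > g j then (1 : Int) else 0)
              * (∑ t ∈ Finset.Ico (j + 1) u, if g t < g j then (1 : Int) else 0)) := by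
  simp only [gt_iff_lt, pvIteOrSplit, Finset.sum_add_distrib, ← Finset.mul_sum]
  rw [pvSumIcoIcoComm, pvSumIcoIcoComm]
  simp only [← Finset.sum_mul]

-- a window of fewer than three indices holds no triple: the middle-element sum is 0
theorem pvMiddleZero (g : Int → Int) (l u : Int) (h : u - l < 3) :
    (∑ j ∈ Finset.Ico l u,
        ((∑ t ∈ Finset.Ico l j, if g t < g j then (1 : Int) else 0)
            * (∑ t ∈ Finset.Ico (j + 1) u, if g t > g j then (1 : Int) else 0)
          + (∑ t ∈ Finset.Ico l j, if g t > g j then (1 : Int) else 0)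
            * (∑ t ∈ Finset.Ico (j + 1) u, if g t < g j then (1 : Int) else 0))) = 0 := by
  apply Finset.sum_eq_zero
  intro j hj
  rw [Finset.mem_Ico] at hj
  by_cases hjl : j = l
  · subst hjl; simp
  · have hju : j + 1 = u := by omega
    rw [hju]
    simp

-- the per-query window computations of the two ports agree, for any indexing function
theorem pvWindowEq (g : Int → Int) (l r : Int) :
    (PySem.List.pyRange l (r + 1) 1).foldl (fun count i =>
      (PySem.List.pyRange (i + 1) (r + 1) 1).foldl (fun count j =>
        (PySem.List.pyRange (j + 1) (r + 1) 1).foldl (fun count k =>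
          if (g i < g j ∧ g j < g k) ∨ (g i > g j ∧ g j > g k)
          then count + 1 else count) count) count) 0
    = (PySem.List.pyRange l (r + 1) 1).foldl (fun total j =>
        total + ((((PySem.List.pyRange l j 1).map (fun t => if g t < g j then (1 : Int) else 0)).sum
                    * (((PySem.List.pyRange (j + 1) (r + 1) 1).map (fun t => if g t > g j then (1 : Int) else 0)).sum))
                  + (((PySem.List.pyRange l j 1).map (fun t => if g t > g j then (1 : Int) else 0)).sum
                    * (((PySem.List.pyRange (j + 1) (r + 1) 1).map (fun t => if g t < g j then (1 : Int) else 0)).sum)))) 0 := by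
  simp only [pvFoldlIfCount, pvFoldlPlus, zero_add, pvSumIco]
  exact pvMiddleZ g l (r + 1)

-- the two ports agree on every input
theorem pvPortsEq (rating : List Int) (queries : List (List Int)) :
    countTeams rating queries = countTeams_alt rating queries := by
  unfold countTeams countTeams_alt
  rw [PySem.List.foldl_append_singleton_eq_map, PySem.List.foldl_append_singleton_eq_map]
  simp only [List.nil_append]
  apply List.map_congr_left
  intro q _
  simp only [pvCountIn]
  by_cases hw : PySem.List.pyGetD q 1 0 - PySem.List.pyGetD q 0 0 + 1 < 3
  · rw [if_pos hw, pvWindowEq (pvRate rating) (PySem.List.pyGetD q 0 0) (PySem.List.pyGetD q 1 0)]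
    simp only [pvFoldlPlus, zero_add, pvSumIco]
    exact pvMiddleZero (pvRate rating) (PySem.List.pyGetD q 0 0)
      (PySem.List.pyGetD q 1 0 + 1) (by omega)
  · rw [if_neg hw]
    exact pvWindowEq (pvRate rating) (PySem.List.pyGetD q 0 0) (PySem.List.pyGetD q 1 0)

-- ===== VERDICT (by name: the statement is the Claim_ definition above) =====
theorem countTeams_spec : Claim_equal_countTeams := by
  intro rating queries _ _
  unfold Spec_countTeams
  exact pvPortsEq rating queries
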